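-- pv_equiv track=rewrite | github.com/Lbassoco95/analista | utils/extract_price.py | extract_white_label_info
-- ===== SOURCE A (Python) =====
-- from typing import Optional, List, Dict, Any
--
-- def extract_white_label_info(text: str) -> List[tuple]:
--     """
--     Extraer información relevante sobre white label, wallet y otros módulos.
--
--     Args:
--         text: Texto completo a analizar
--
--     Returns:
--         Lista de tuplas (modulo, texto_relevante)
--     """
--     if not text:
--         return []
--
--     # Definir módulos y sus palabras clave
--     modules_keywords = {
--         'White Label Wallet': ['white label', 'whitelabel', 'wallet', 'crypto wallet', 'digital wallet'],
--         'KYC/KYB': ['kyc', 'kyb', 'verification', 'identity', 'compliance', 'onboarding'],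
--         'Crypto Trading': ['trading', 'exchange', 'crypto exchange', 'trading platform'],
--         'Payment Gateway': ['payment', 'gateway', 'fiat', 'onramp', 'offramp'],
--         'Digital Signature': ['signature', 'digital signature', 'e-signature', 'certificate'],
--         'Custody': ['custody', 'custodial', 'cold storage', 'hot wallet'],
--         'Cross Border': ['cross border', 'crossborder', 'international', 'remittance']
--     }
--
--     results = []
--     paragraphs = text.split('\n\n')
--
--     for module, keywords in modules_keywords.items():
--         relevant_paragraphs = []
--
--         for paragraph in paragraphs:
--             paragraph_lower = paragraph.lower()
--
--             # Verificar si el párrafo contiene palabras clave del módulo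
--             if any(keyword.lower() in paragraph_lower for keyword in keywords):
--                 # Verificar que el párrafo tenga contenido sustancial
--                 if len(paragraph.strip()) > 50:  # Mínimo 50 caracteres
--                     relevant_paragraphs.append(paragraph.strip())
--
--         # Si se encontraron párrafos relevantes, agregar a resultados
--         if relevant_paragraphs:
--             # Combinar párrafos relevantes del mismo módulo
--             combined_text = ' '.join(relevant_paragraphs)
--             results.append((module, combined_text))
--
--     return results
-- ===== SOURCE B (Python) =====
-- from typing import List
--
-- MODULES = [
--     ('White Label Wallet', ['white label', 'whitelabel', 'wallet', 'crypto wallet', 'digital wallet']),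
--     ('KYC/KYB', ['kyc', 'kyb', 'verification', 'identity', 'compliance', 'onboarding']),
--     ('Crypto Trading', ['trading', 'exchange', 'crypto exchange', 'trading platform']),
--     ('Payment Gateway', ['payment', 'gateway', 'fiat', 'onramp', 'offramp']),
--     ('Digital Signature', ['signature', 'digital signature', 'e-signature', 'certificate']),
--     ('Custody', ['custody', 'custodial', 'cold storage', 'hot wallet']),
--     ('Cross Border', ['cross border', 'crossborder', 'international', 'remittance']),
-- ]
--
-- # flat inverted keyword index: keyword -> bit of the module it belongs to
-- KW_BITS = [(k, 1 << i) for i, (_name, kws) in enumerate(MODULES) for k in kws]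
--
-- def extract_white_label_info(text: str) -> List[tuple]:
--     """Annotate each substantial paragraph once with a bitmask of matched
--     modules (via the flat keyword index), then emit one joined entry per
--     set bit, in module order."""
--     rows = []
--     for paragraph in text.split('\n\n'):
--         stripped = paragraph.strip()
--         if len(stripped) > 50:
--             low = paragraph.lower()
--             mask = 0
--             for k, b in KW_BITS:
--                 if k in low:
--                     mask |= b
--             rows.append((mask, stripped))
--     results = []
--     for i, (name, _kws) in enumerate(MODULES):
--         texts = [st for mask, st in rows if mask >> i & 1]
--         if texts:
--             results.append((name, ' '.join(texts)))
--     return results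
-- ===== Notes on version B (the rewrite author's own statement) =====
-- stated objective: alternative
-- what changed: B replaces A's per-module rescan of all paragraphs with a flat inverted keyword index (keyword -> module bit): each substantial paragraph is stripped/lowercased once and annotated with a bitmask of matched modules in a single pass over that flat index, then the output is emitted per bit in module order from the mask-annotated rows.
import Mathlib
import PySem

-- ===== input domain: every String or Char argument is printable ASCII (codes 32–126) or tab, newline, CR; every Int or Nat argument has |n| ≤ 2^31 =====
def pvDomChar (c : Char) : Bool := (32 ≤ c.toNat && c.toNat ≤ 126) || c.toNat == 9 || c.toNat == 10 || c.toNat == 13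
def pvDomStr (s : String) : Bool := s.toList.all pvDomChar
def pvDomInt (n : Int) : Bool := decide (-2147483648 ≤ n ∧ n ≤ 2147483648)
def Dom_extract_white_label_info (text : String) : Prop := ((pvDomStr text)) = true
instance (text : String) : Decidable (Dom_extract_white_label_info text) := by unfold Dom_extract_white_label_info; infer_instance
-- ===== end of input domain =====

-- B annotates each substantial paragraph once with a bitmask of matched modules via a flat
-- inverted keyword index, then emits per bit in module order, instead of A's per-module rescan.

-- the module/keyword table both Pythons carry verbatim
def pvModules : List (String × List String) :=
  [("White Label Wallet", ["white label", "whitelabel", "wallet", "crypto wallet", "digital wallet"]),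
   ("KYC/KYB", ["kyc", "kyb", "verification", "identity", "compliance", "onboarding"]),
   ("Crypto Trading", ["trading", "exchange", "crypto exchange", "trading platform"]),
   ("Payment Gateway", ["payment", "gateway", "fiat", "onramp", "offramp"]),
   ("Digital Signature", ["signature", "digital signature", "e-signature", "certificate"]),
   ("Custody", ["custody", "custodial", "cold storage", "hot wallet"]),
   ("Cross Border", ["cross border", "crossborder", "international", "remittance"])]

-- ===== PORT A =====
def extract_white_label_info (text : String) : List (String × String) :=
  if text = "" then []
  else
    let paragraphs := (PySem.Str.split? text "\n\n").getD []   -- sep ≠ "": split? never raises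
    pvModules.foldl (fun results mk =>
      let relevant := paragraphs.foldl (fun rel paragraph =>
        let paragraph_lower := PySem.Str.lower paragraph
        if mk.2.any (fun keyword => PySem.Str.isIn (PySem.Str.lower keyword) paragraph_lower) then
          if 50 < PySem.Str.len (PySem.Str.strip paragraph) then
            rel ++ [PySem.Str.strip paragraph]
          else rel
        else rel) []
      if relevant ≠ [] then results ++ [(mk.1, PySem.Str.join " " relevant)] else results) []

-- ===== PORT B =====
-- KW_BITS = [(k, 1 << i) for i, (_name, kws) in enumerate(MODULES) for k in kws]
def pvKwBits : List (String × Nat) :=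
  (PySem.List.enumerate pvModules).flatMap (fun imk => imk.2.2.map (fun k => (k, 1 <<< imk.1.toNat)))

-- the per-paragraph mask loop: 'for k, b in KW_BITS: if k in low: mask |= b'
def pvMask (low : String) : Nat :=
  pvKwBits.foldl (fun m kb => if PySem.Str.isIn kb.1 low then m ||| kb.2 else m) 0

def extract_white_label_info_alt (text : String) : List (String × String) :=
  let rows := ((PySem.Str.split? text "\n\n").getD []).foldl (fun rows paragraph =>
    let stripped := PySem.Str.strip paragraph
    if 50 < PySem.Str.len stripped then
      let low := PySem.Str.lower paragraph
      let mask := pvMask low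
      rows ++ [(mask, stripped)]
    else rows) []
  (PySem.List.enumerate pvModules).foldl (fun results imk =>
    let texts := rows.foldl (fun ts r => if r.1.testBit imk.1.toNat then ts ++ [r.2] else ts)
      ([] : List String)
    if texts ≠ [] then results ++ [(imk.2.1, PySem.Str.join " " texts)] else results) []

-- ===== PRECONDITION & SPEC =====
def Spec_extract_white_label_info (text : String) (out : List (String × String)) : Prop := out = extract_white_label_info_alt text
instance (text : String) (out : List (String × String)) : Decidable (Spec_extract_white_label_info text out) := by unfold Spec_extract_white_label_info; infer_instance

-- ===== CLAIM (what is proved, stated in full; the proofs are below) =====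
def Claim_equal_extract_white_label_info : Prop := ∀ (text : String), Dom_extract_white_label_info text → Spec_extract_white_label_info text (extract_white_label_info text)

-- ===== LEMMAS AND PROOFS =====

-- the joint relevance test (keywords already lowercase)
def pvPred (kws : List String) (p : String) : Bool :=
  (kws.any (fun keyword => PySem.Str.isIn keyword (PySem.Str.lower p))) &&
    decide (50 < PySem.Str.len (PySem.Str.strip p))

-- A's inner paragraph loop is filter-then-map
theorem pvInnerA (kws : List String) (hk : ∀ k ∈ kws, PySem.Str.lower k = k) (ps : List String) :
    ps.foldl (fun rel paragraph =>
      if kws.any (fun keyword => PySem.Str.isIn (PySem.Str.lower keyword) (PySem.Str.lower paragraph)) then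
        if 50 < PySem.Str.len (PySem.Str.strip paragraph) then
          rel ++ [PySem.Str.strip paragraph]
        else rel
      else rel) []
    = (ps.filter (pvPred kws)).map PySem.Str.strip := by
  have hstep : ∀ (acc : List String), ∀ p ∈ ps,
      (if kws.any (fun keyword => PySem.Str.isIn (PySem.Str.lower keyword) (PySem.Str.lower p)) then
         if 50 < PySem.Str.len (PySem.Str.strip p) then acc ++ [PySem.Str.strip p] else acc
       else acc)
      = if pvPred kws p then acc ++ [PySem.Str.strip p] else acc := by
    intro acc p _
    have hany : (kws.any fun keyword => PySem.Str.isIn (PySem.Str.lower keyword) (PySem.Str.lower p))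
        = kws.any fun keyword => PySem.Str.isIn keyword (PySem.Str.lower p) := by
      refine PySem.List.any_congr_mem ?_
      intro k hkk
      rw [hk k hkk]
    cases hb : (kws.any fun keyword => PySem.Str.isIn keyword (PySem.Str.lower p)) with
    | false => simp only [pvPred, hany, hb, Bool.false_and]; simp
    | true =>
      by_cases h2 : 50 < PySem.Str.len (PySem.Str.strip p) <;>
        · simp only [pvPred, hany, hb, Bool.true_and]
          simp
  rw [PySem.List.foldl_congr_mem ps _ _ [] hstep,
    PySem.List.foldl_append_if (pvPred kws) PySem.Str.strip ps []]
  simp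

-- a bit of an OR-accumulating masking fold
theorem pvTestBitMaskFold (l : List (String × Nat)) (c : String → Bool) (m0 i : Nat) :
    Nat.testBit (l.foldl (fun m kb => if c kb.1 then m ||| kb.2 else m) m0) i
      = (m0.testBit i || l.any (fun kb => c kb.1 && kb.2.testBit i)) := by
  induction l generalizing m0 with
  | nil => simp
  | cons hd tl ih =>
    rw [List.foldl_cons]
    cases hc : c hd.1 with
    | true =>
      rw [if_pos rfl, ih, Nat.testBit_or]
      simp [hc, Bool.or_assoc]
    | false =>
      simp [hc, ih]

-- 'any (c ∧ closed)' over a pair list = 'any c' over the first components passing the closed test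
theorem pvAnyAndConst (l : List (String × Nat)) (q : String × Nat → Bool) (c : String → Bool) :
    l.any (fun kb => c kb.1 && q kb) = ((l.filter q).map Prod.fst).any c := by
  induction l with
  | nil => simp
  | cons hd tl ih =>
    cases hq : q hd with
    | true => simp [List.any_cons, hq, ih]
    | false => simp [List.any_cons, hq, ih]

-- bit i of a paragraph's mask = 'some keyword of module i occurs'
theorem pvBit (i : Nat) (mk : String × List String) (h : pvModules[i]? = some mk) :
    ∀ low, Nat.testBit (pvMask low) i = mk.2.any (fun k => PySem.Str.isIn k low) := by
  intro low
  unfold pvMask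
  rw [pvTestBitMaskFold pvKwBits (fun k => PySem.Str.isIn k low) 0 i, Nat.zero_testBit,
    Bool.false_or, pvAnyAndConst pvKwBits (fun kb => kb.2.testBit i) (fun k => PySem.Str.isIn k low)]
  have hlt : i < 7 := by
    by_contra hge
    rw [List.getElem?_eq_none (by simpa [pvModules] using Nat.le_of_not_lt hge)] at h
    cases h
  interval_cases i <;>
    (simp only [pvModules, List.getElem?_cons_zero, List.getElem?_cons_succ,
       Option.some.injEq] at h; subst h; congr 1)

-- B's per-module extraction from the mask-annotated rows = the common filter/map normal form
theorem pvInnerB (i : Nat) (kws : List String)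
    (hbit : ∀ low, Nat.testBit (pvMask low) i = kws.any (fun k => PySem.Str.isIn k low))
    (ps : List String) :
    ((ps.filter fun p => decide (50 < PySem.Str.len (PySem.Str.strip p))).map
        (fun p => (pvMask (PySem.Str.lower p), PySem.Str.strip p))).foldl
      (fun ts r => if r.1.testBit i then ts ++ [r.2] else ts) ([] : List String)
    = (ps.filter (pvPred kws)).map PySem.Str.strip := by
  rw [PySem.List.foldl_append_if (fun r => Nat.testBit r.1 i) (fun r : Nat × String => r.2) _ [],
    List.nil_append, List.filter_map, List.map_map, List.filter_filter]
  refine congrArg _ (List.filter_congr ?_)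
  intro p _
  simp only [Function.comp, pvPred, hbit (PySem.Str.lower p)]

-- ===== VERDICT (by name: the statement is the Claim_ definition above) =====
theorem extract_white_label_info_spec : Claim_equal_extract_white_label_info := by
  intro text _
  unfold Spec_extract_white_label_info extract_white_label_info extract_white_label_info_alt
  by_cases htext : text = ""
  · subst htext
    rw [if_pos rfl]
    decide
  · rw [if_neg htext]
    simp only []
    generalize (PySem.Str.split? text "\n\n").getD [] = ps
    rw [PySem.List.foldl_append_ite
      (fun paragraph => 50 < PySem.Str.len (PySem.Str.strip paragraph))
      (fun paragraph => (pvMask (PySem.Str.lower paragraph), PySem.Str.strip paragraph)) ps [],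
      List.nil_append]
    rw [show PySem.List.enumerate pvModules =
      [((0 : Int), ("White Label Wallet", ["white label", "whitelabel", "wallet", "crypto wallet", "digital wallet"])),
       ((1 : Int), ("KYC/KYB", ["kyc", "kyb", "verification", "identity", "compliance", "onboarding"])),
       ((2 : Int), ("Crypto Trading", ["trading", "exchange", "crypto exchange", "trading platform"])),
       ((3 : Int), ("Payment Gateway", ["payment", "gateway", "fiat", "onramp", "offramp"])),
       ((4 : Int), ("Digital Signature", ["signature", "digital signature", "e-signature", "certificate"])),
       ((5 : Int), ("Custody", ["custody", "custodial", "cold storage", "hot wallet"])),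
       ((6 : Int), ("Cross Border", ["cross border", "crossborder", "international", "remittance"]))] from by decide]
    simp only [pvModules, List.foldl_cons, List.foldl_nil,
      show ((0:Int)).toNat = 0 from rfl, show ((1:Int)).toNat = 1 from rfl,
      show ((2:Int)).toNat = 2 from rfl, show ((3:Int)).toNat = 3 from rfl,
      show ((4:Int)).toNat = 4 from rfl, show ((5:Int)).toNat = 5 from rfl,
      show ((6:Int)).toNat = 6 from rfl]
    rw [pvInnerA _ (by decide) ps, pvInnerA _ (by decide) ps, pvInnerA _ (by decide) ps,
      pvInnerA _ (by decide) ps, pvInnerA _ (by decide) ps, pvInnerA _ (by decide) ps,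
      pvInnerA _ (by decide) ps,
      pvInnerB 0 _ (pvBit 0 _ rfl) ps, pvInnerB 1 _ (pvBit 1 _ rfl) ps,
      pvInnerB 2 _ (pvBit 2 _ rfl) ps, pvInnerB 3 _ (pvBit 3 _ rfl) ps,
      pvInnerB 4 _ (pvBit 4 _ rfl) ps, pvInnerB 5 _ (pvBit 5 _ rfl) ps,
      pvInnerB 6 _ (pvBit 6 _ rfl) ps]
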